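-- pv_equiv track=rewrite | github.com/olaor/adventofcode | 2024/10/part2.py | count_trails_from
-- ===== SOURCE A (Python) =====
-- from functools import lru_cache
--
-- def count_trails_from(map_data, x, y):
--     """Counts all distinct hiking trails starting from (x, y) to height 9."""
--     rows, cols = len(map_data), len(map_data[0])
--
--     @lru_cache(None)
--     def dfs(x, y):
--         # Base case: If the current position is height 9, this is a valid trail.
--         if map_data[x][y] == 9:
--             return 1
--
--         total_trails = 0
--         current_height = map_data[x][y]
--
--         # Explore all four possible directions
--         for dx, dy in [(-1, 0), (1, 0), (0, -1), (0, 1)]: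
--             nx, ny = x + dx, y + dy
--             if 0 <= nx < rows and 0 <= ny < cols:
--                 next_height = map_data[nx][ny]
--                 if next_height == current_height + 1:  # Valid uphill step
--                     total_trails += dfs(nx, ny)
--
--         return total_trails
--
--     # Start the recursive trail counting from the given position
--     return dfs(x, y)
-- ===== SOURCE B (Python) =====
-- def count_trails_from(map_data, x, y):
--     """Counts all distinct hiking trails starting from (x, y) to height 9."""
--     rows, cols = len(map_data), len(map_data[0])
--
--     def uphill_sum(dp, r, c, h):
--         # trails from (r, c) of height h = sum of trails from in-bounds uphill neighbors
--         return sum(dp[(nr, nc)]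
--                    for nr, nc in ((r - 1, c), (r + 1, c), (r, c - 1), (r, c + 1))
--                    if 0 <= nr < rows and 0 <= nc < cols and map_data[nr][nc] == h + 1)
--
--     # bottom-up: fill dp in order of strictly decreasing height, so every
--     # uphill neighbor is already computed when a cell is processed
--     cells = [(r, c) for r in range(rows) for c in range(cols)]
--     cells.sort(key=lambda p: map_data[p[0]][p[1]], reverse=True)
--     dp = {}
--     for r, c in cells:
--         h = map_data[r][c]
--         dp[(r, c)] = 1 if h == 9 else uphill_sum(dp, r, c, h)
--     # one application of the recurrence at the start cell
--     h = map_data[x][y]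
--     return 1 if h == 9 else uphill_sum(dp, x, y, h)
-- ===== Notes on version B (the rewrite author's own statement) =====
-- stated objective: alternative
-- what changed: Replaces A's top-down lru_cache-memoized DFS recursion with a bottom-up DP: all cells are sorted by height in decreasing order and a dp dictionary is filled iteratively so every uphill neighbor is already computed, with one final application of the recurrence at the start cell.
-- outside the precondition, e.g. on count_trails_from(((9, 9), (1,)), 0, 0): A returns 1, B raises IndexError
import Mathlib
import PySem

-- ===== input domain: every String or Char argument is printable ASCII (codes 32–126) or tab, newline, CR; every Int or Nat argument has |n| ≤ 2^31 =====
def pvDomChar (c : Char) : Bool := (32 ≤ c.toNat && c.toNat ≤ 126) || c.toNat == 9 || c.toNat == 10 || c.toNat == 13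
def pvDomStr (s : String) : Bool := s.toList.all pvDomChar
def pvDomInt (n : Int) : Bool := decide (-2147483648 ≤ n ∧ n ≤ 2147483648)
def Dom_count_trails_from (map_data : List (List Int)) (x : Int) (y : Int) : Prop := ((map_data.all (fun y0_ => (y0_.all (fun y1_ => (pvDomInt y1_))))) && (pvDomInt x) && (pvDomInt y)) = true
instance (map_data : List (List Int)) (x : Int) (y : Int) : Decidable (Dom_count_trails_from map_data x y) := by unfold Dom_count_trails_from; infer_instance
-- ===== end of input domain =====

-- B replaces A's top-down memoized DFS by a bottom-up DP table filled in order of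
-- strictly decreasing height (objective: alternative decomposition, same asymptotic cost).


-- ===== PORT A =====

-- map_data[r][c] (Python indexing: negative wraps, out of range raises); exact under
-- Pre_ (there every access made by either program succeeds, so the 0 default is never taken)
def cellAt (m : List (List Int)) (r c : Int) : Int :=
  ((PySem.List.pyGet? m r).bind (fun row => PySem.List.pyGet? row c)).getD 0

-- termination measure bound for the strictly-uphill recursion
def maxHeight (m : List (List Int)) : Int := (m.flatMap id).foldl max 0

theorem cellAt_le_maxHeight (m : List (List Int)) (r c : Int) : cellAt m r c ≤ maxHeight m := by
  unfold cellAt maxHeight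
  have h0 : (0:Int) ≤ (m.flatMap id).foldl max 0 := (PySem.List.le_foldl_max (m.flatMap id) 0).1
  cases hrow : PySem.List.pyGet? m r with
  | none => simpa [hrow] using h0
  | some row =>
    cases hv : PySem.List.pyGet? row c with
    | none => simpa [hrow, hv] using h0
    | some v =>
      have hm : v ∈ m.flatMap id := List.mem_flatMap.mpr ⟨row,
        PySem.List.mem_of_pyGet?_eq_some m hrow, PySem.List.mem_of_pyGet?_eq_some row hv⟩
      simpa [hrow, hv] using ((PySem.List.le_foldl_max (m.flatMap id) 0).2 v hm)

-- the guard '0 <= nx < rows and 0 <= ny < cols and map_data[nx][ny] == h + 1'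
-- (both Pythons test exactly this conjunction before using a neighbor)
def stepOk (m : List (List Int)) (rows cols h nx ny : Int) : Bool :=
  decide (0 ≤ nx) && decide (nx < rows) && decide (0 ≤ ny) && decide (ny < cols) &&
    decide (cellAt m nx ny = h + 1)

theorem stepOk_iff (m : List (List Int)) (rows cols h nx ny : Int) :
    stepOk m rows cols h nx ny = true ↔
      (0 ≤ nx ∧ nx < rows ∧ 0 ≤ ny ∧ ny < cols ∧ cellAt m nx ny = h + 1) := by
  simp [stepOk, and_assoc]

-- the strictly-uphill step decreases the termination measure of dfsA
theorem dfsA_dec (m : List (List Int)) (rows cols x y nx ny : Int)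
    (h : stepOk m rows cols (cellAt m x y) nx ny = true) :
    (1 + maxHeight m - cellAt m nx ny).toNat < (1 + maxHeight m - cellAt m x y).toNat := by
  have hub := cellAt_le_maxHeight m x y
  have heq := ((stepOk_iff m rows cols (cellAt m x y) nx ny).mp h).2.2.2.2
  omega

-- the lru_cached dfs of A (memoization dropped: it only affects running time);
-- the 4-direction loop is unrolled literally, branch order preserved
def dfsA (m : List (List Int)) (rows cols : Int) (x y : Int) : Int :=
  if cellAt m x y = 9 then 1
  else
    (if stepOk m rows cols (cellAt m x y) (x-1) y then dfsA m rows cols (x-1) y else 0) +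
    (if stepOk m rows cols (cellAt m x y) (x+1) y then dfsA m rows cols (x+1) y else 0) +
    (if stepOk m rows cols (cellAt m x y) x (y-1) then dfsA m rows cols x (y-1) else 0) +
    (if stepOk m rows cols (cellAt m x y) x (y+1) then dfsA m rows cols x (y+1) else 0)
termination_by (1 + maxHeight m - cellAt m x y).toNat
decreasing_by
  all_goals rename_i hcond
  · exact dfsA_dec m rows cols x y (x-1) y hcond
  · exact dfsA_dec m rows cols x y (x+1) y hcond
  · exact dfsA_dec m rows cols x y x (y-1) hcond
  · exact dfsA_dec m rows cols x y x (y+1) hcond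

def count_trails_from (map_data : List (List Int)) (x : Int) (y : Int) : Int :=
  dfsA map_data (map_data.length : Int) ((map_data.headD []).length : Int) x y

-- ===== PORT B =====

-- sum of dp over the in-bounds neighbors exactly one higher (B's uphill_sum);
-- dp[(nr,nc)] is exact: under Pre_ every key this reads is present in dp
def uphillSum (m : List (List Int)) (rows cols : Int) (dp : PySem.Dict (Int × Int) Int)
    (r c h : Int) : Int :=
  (([(r-1, c), (r+1, c), (r, c-1), (r, c+1)].filter
      (fun p => stepOk m rows cols h p.1 p.2)).map
      (fun p => dp.getD p 0)).sum

-- [(r, c) for r in range(rows) for c in range(cols)]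
def allCells (rows cols : Int) : List (Int × Int) :=
  (PySem.List.pyRange 0 rows 1).flatMap
    (fun r => (PySem.List.pyRange 0 cols 1).map (fun c => (r, c)))

def count_trails_from_alt (map_data : List (List Int)) (x : Int) (y : Int) : Int :=
  let rows : Int := map_data.length
  let cols : Int := (map_data.headD []).length
  let cells := PySem.List.sorted (allCells rows cols) (fun p => cellAt map_data p.1 p.2) true
  let dp := cells.foldl
    (fun dp p => dp.insert p
      (if cellAt map_data p.1 p.2 = 9 then 1
       else uphillSum map_data rows cols dp p.1 p.2 (cellAt map_data p.1 p.2)))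
    PySem.Dict.empty
  if cellAt map_data x y = 9 then 1 else uphillSum map_data rows cols dp x y (cellAt map_data x y)

-- ===== PRECONDITION & SPEC =====
-- Pre_ excludes the inputs on which A's Python raises (empty grid, start index outside
-- Python's wrap range) and ragged grids: on a ragged grid every row access is checked
-- against len(map_data[0]), so A may raise mid-search while B's full sweep raises on
-- any short row even where A happens to return.
def Pre_count_trails_from (map_data : List (List Int)) (x : Int) (y : Int) : Prop :=
  map_data ≠ [] ∧
  (∀ row ∈ map_data, row.length = (map_data.headD []).length) ∧
  -(map_data.length : Int) ≤ x ∧ x < (map_data.length : Int) ∧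
  -((map_data.headD []).length : Int) ≤ y ∧ y < ((map_data.headD []).length : Int)
instance (map_data : List (List Int)) (x : Int) (y : Int) : Decidable (Pre_count_trails_from map_data x y) := by unfold Pre_count_trails_from; infer_instance

def pvWitness_count_trails_from : List (List Int) × Int × Int := ([[0, 1, 2], [7, 8, 9]], 0, 0)

def Spec_count_trails_from (map_data : List (List Int)) (x : Int) (y : Int) (out : Int) : Prop := out = count_trails_from_alt map_data x y
instance (map_data : List (List Int)) (x : Int) (y : Int) (out : Int) : Decidable (Spec_count_trails_from map_data x y out) := by unfold Spec_count_trails_from; infer_instance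

-- ===== CLAIM (what is proved, stated in full; the proofs are below) =====
def Claim_equal_count_trails_from : Prop := ∀ (map_data : List (List Int)) (x : Int) (y : Int), Dom_count_trails_from map_data x y → Pre_count_trails_from map_data x y → Spec_count_trails_from map_data x y (count_trails_from map_data x y)

-- ===== LEMMAS AND PROOFS =====

-- a filtered-and-summed 4-element list is the corresponding sum of four guarded terms
theorem sum4_filter (g : Int × Int → Bool) (f : Int × Int → Int) (a b c d : Int × Int) :
    ((([a, b, c, d].filter g).map f).sum)
      = (if g a then f a else 0) + (if g b then f b else 0)
        + (if g c then f c else 0) + (if g d then f d else 0) := by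
  cases ha : g a <;> cases hb : g b <;> cases hc : g c <;> cases hd : g d <;>
    simp [List.filter, ha, hb, hc, hd] <;> ring

-- uphillSum over a dict that is already correct on admitted uphill neighbors
-- equals the four guarded dfsA terms of one unfolding of dfsA
theorem uphillSum_eq (m : List (List Int)) (rows cols : Int)
    (d : PySem.Dict (Int × Int) Int) (x y : Int)
    (hdp : ∀ n : Int × Int, stepOk m rows cols (cellAt m x y) n.1 n.2 = true →
      d.getD n 0 = dfsA m rows cols n.1 n.2) :
    uphillSum m rows cols d x y (cellAt m x y) =
      (if stepOk m rows cols (cellAt m x y) (x-1) y then dfsA m rows cols (x-1) y else 0) +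
      (if stepOk m rows cols (cellAt m x y) (x+1) y then dfsA m rows cols (x+1) y else 0) +
      (if stepOk m rows cols (cellAt m x y) x (y-1) then dfsA m rows cols x (y-1) else 0) +
      (if stepOk m rows cols (cellAt m x y) x (y+1) then dfsA m rows cols x (y+1) else 0) := by
  have t : ∀ n1 n2 : Int,
      (if stepOk m rows cols (cellAt m x y) n1 n2 then d.getD (n1, n2) 0 else 0)
      = (if stepOk m rows cols (cellAt m x y) n1 n2 then dfsA m rows cols n1 n2 else 0) := by
    intro n1 n2
    cases hc : stepOk m rows cols (cellAt m x y) n1 n2 with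
    | false => simp
    | true => simpa using hdp (n1, n2) hc
  unfold uphillSum
  rw [sum4_filter]
  simp only [t]

-- membership in the cell list = in-bounds
theorem mem_allCells (rows cols : Int) (p : Int × Int) :
    p ∈ allCells rows cols ↔ 0 ≤ p.1 ∧ p.1 < rows ∧ 0 ≤ p.2 ∧ p.2 < cols := by
  unfold allCells
  constructor
  · intro hp
    rcases List.mem_flatMap.mp hp with ⟨r, hr, hmap⟩
    rcases List.mem_map.mp hmap with ⟨c, hc, rfl⟩
    have h1 := (PySem.List.mem_pyRange_one).mp hr
    have h2 := (PySem.List.mem_pyRange_one).mp hc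
    exact ⟨h1.1, h1.2, h2.1, h2.2⟩
  · rintro ⟨h1, h2, h3, h4⟩
    exact List.mem_flatMap.mpr ⟨p.1, (PySem.List.mem_pyRange_one).mpr ⟨h1, h2⟩,
      List.mem_map.mpr ⟨p.2, (PySem.List.mem_pyRange_one).mpr ⟨h3, h4⟩, rfl⟩⟩

-- dp-loop invariant: folding B's update over a height-descending list of in-bounds
-- cells extends a dict that is already correct off the list to one correct everywhere
theorem dp_foldl_correct (m : List (List Int)) (rows cols : Int) :
    ∀ (l : List (Int × Int)) (d : PySem.Dict (Int × Int) Int),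
      (∀ p ∈ l, 0 ≤ p.1 ∧ p.1 < rows ∧ 0 ≤ p.2 ∧ p.2 < cols) →
      l.Pairwise (fun a b => cellAt m b.1 b.2 ≤ cellAt m a.1 a.2) →
      (∀ q : Int × Int, 0 ≤ q.1 → q.1 < rows → 0 ≤ q.2 → q.2 < cols → q ∉ l →
        d.getD q 0 = dfsA m rows cols q.1 q.2) →
      (∀ q : Int × Int, 0 ≤ q.1 → q.1 < rows → 0 ≤ q.2 → q.2 < cols →
        (l.foldl
          (fun dp p => dp.insert p
            (if cellAt m p.1 p.2 = 9 then 1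
             else uphillSum m rows cols dp p.1 p.2 (cellAt m p.1 p.2))) d).getD q 0
          = dfsA m rows cols q.1 q.2) := by
  intro l
  induction l with
  | nil =>
    intro d _ _ hd q h1 h2 h3 h4
    exact hd q h1 h2 h3 h4 (List.not_mem_nil)
  | cons p l ih =>
    intro d hin hpw hd q h1 h2 h3 h4
    simp only [List.foldl_cons]
    have hpin := hin p (List.mem_cons_self)
    have hdesc : ∀ n ∈ l, cellAt m n.1 n.2 ≤ cellAt m p.1 p.2 :=
      fun n hn => (List.pairwise_cons.mp hpw).1 n hn
    -- the value written for p is dfsA at p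
    have hval :
        (if cellAt m p.1 p.2 = 9 then 1
         else uphillSum m rows cols d p.1 p.2 (cellAt m p.1 p.2))
          = dfsA m rows cols p.1 p.2 := by
      rw [dfsA]
      by_cases h9 : cellAt m p.1 p.2 = 9
      · simp [h9]
      · -- each admitted uphill neighbor is strictly higher, hence already correct in d
        have hnb : ∀ n : Int × Int,
            stepOk m rows cols (cellAt m p.1 p.2) n.1 n.2 = true →
            d.getD n 0 = dfsA m rows cols n.1 n.2 := by
          intro n hs
          obtain ⟨hn1, hn2, hn3, hn4, hh⟩ :=
            (stepOk_iff m rows cols (cellAt m p.1 p.2) n.1 n.2).mp hs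
          refine hd n hn1 hn2 hn3 hn4 ?_
          intro hmem
          rcases List.mem_cons.mp hmem with rfl | hmem'
          · omega
          · have := hdesc n hmem'; omega
        simp only [h9, if_false]
        exact uphillSum_eq m rows cols d p.1 p.2 hnb
    -- apply the induction hypothesis to the extended dict
    refine ih (d.insert p _) (fun n hn => hin n (List.mem_cons_of_mem _ hn))
      (List.pairwise_cons.mp hpw).2 ?_ q h1 h2 h3 h4
    intro q' hq1 hq2 hq3 hq4 hq5
    by_cases hqp : q' = p
    · subst hqp
      rw [PySem.Dict.getD_insert_self, hval]
    · rw [PySem.Dict.getD_insert_of_ne _ _ _ hqp]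
      exact hd q' hq1 hq2 hq3 hq4 (by
        intro hmem
        rcases List.mem_cons.mp hmem with h | h
        · exact hqp h
        · exact hq5 h)

-- the ports agree on every input (no Pre_ needed: both are total via the same cellAt)
theorem ports_agree (m : List (List Int)) (x y : Int) :
    count_trails_from m x y = count_trails_from_alt m x y := by
  unfold count_trails_from count_trails_from_alt
  set rows : Int := (m.length : Int) with hrows
  set cols : Int := ((m.headD []).length : Int) with hcols
  set L := PySem.List.sorted (allCells rows cols) (fun p => cellAt m p.1 p.2) true with hL
  set dpF := L.foldl
    (fun dp p => dp.insert p
      (if cellAt m p.1 p.2 = 9 then 1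
       else uphillSum m rows cols dp p.1 p.2 (cellAt m p.1 p.2)))
    PySem.Dict.empty with hdpF
  have hmemL : ∀ p : Int × Int, p ∈ L ↔ 0 ≤ p.1 ∧ p.1 < rows ∧ 0 ≤ p.2 ∧ p.2 < cols := by
    intro p
    rw [hL, PySem.List.mem_sorted, mem_allCells]
  have hpw : L.Pairwise (fun a b => cellAt m b.1 b.2 ≤ cellAt m a.1 a.2) :=
    PySem.List.sorted_pairwise_rev _ _
  have hdp : ∀ q : Int × Int, 0 ≤ q.1 → q.1 < rows → 0 ≤ q.2 → q.2 < cols →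
      dpF.getD q 0 = dfsA m rows cols q.1 q.2 := by
    rw [hdpF]
    exact dp_foldl_correct m rows cols L PySem.Dict.empty
      (fun p hp => (hmemL p).mp hp) hpw
      (fun q h1 h2 h3 h4 hq => absurd ((hmemL q).mpr ⟨h1, h2, h3, h4⟩) hq)
  -- compare one unfolding of dfsA with B's final recurrence application
  rw [dfsA]
  by_cases h9 : cellAt m x y = 9
  · simp [h9]
  · simp only [h9, if_false]
    refine (uphillSum_eq m rows cols dpF x y (fun n hs => ?_)).symm
    obtain ⟨h1, h2, h3, h4, _⟩ := (stepOk_iff m rows cols (cellAt m x y) n.1 n.2).mp hs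
    exact hdp n h1 h2 h3 h4

-- ===== VERDICT (by name: the statement is the Claim_ definition above) =====
theorem count_trails_from_spec : Claim_equal_count_trails_from := by
  intro map_data x y _ _
  unfold Spec_count_trails_from
  exact ports_agree map_data x y
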